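-- pv_equiv track=rewrite | github.com/samyak1729/startup-rag | src/chunking.py | _parse_task_sections
-- ===== SOURCE A (Python) =====
-- def _parse_task_sections(content: str) -> list[tuple[str, str]]:
--     """Parse progress report by task status."""
--     sections = []
--     current_section = "General"
--     current_content = []
--
--     task_keywords = {
--         'completed': ['completed', 'done', 'finished'],
--         'in_progress': ['in progress', 'working on', 'underway'],
--         'upcoming': ['upcoming', 'next', 'planned', 'milestones'],
--         'blocked': ['blocked', 'impediments', 'challenges', 'issues'],
--     }
--
--     for line in content.split('\n'):
--         line_lower = line.lower().strip()
--
--         # Detect task category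
--         for category, keywords in task_keywords.items():
--             if any(kw in line_lower for kw in keywords) and ':' in line:
--                 if current_content:
--                     sections.append((current_section, '\n'.join(current_content)))
--                     current_content = []
--                 current_section = category
--                 break
--
--         current_content.append(line)
--
--     if current_content:
--         sections.append((current_section, '\n'.join(current_content)))
--
--     return sections
-- ===== SOURCE B (Python) =====
-- TASK_KEYWORDS = [
--     ('completed', ['completed', 'done', 'finished']),
--     ('in_progress', ['in progress', 'working on', 'underway']),
--     ('upcoming', ['upcoming', 'next', 'planned', 'milestones']),
--     ('blocked', ['blocked', 'impediments', 'challenges', 'issues']),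
-- ]
--
--
-- def _classify(line):
--     """Category of a header line, or None if the line starts no section."""
--     if ':' not in line:
--         return None
--     low = line.lower().strip()
--     for category, keywords in TASK_KEYWORDS:
--         if any(kw in low for kw in keywords):
--             return category
--     return None
--
--
-- def _parse_task_sections(content: str) -> list[tuple[str, str]]:
--     """Parse progress report by task status."""
--     # Walk the lines right-to-left: a section is emitted the moment its
--     # header line is reached; no current-label state is needed, and the
--     # leftover leading lines become the 'General' section.
--     sections = []
--     tail = []  # lines between the current position and the next header
--     for line in reversed(content.split('\n')):
--         category = _classify(line)
--         if category is None:
--             tail = [line] + tail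
--         else:
--             sections = [(category, '\n'.join([line] + tail))] + sections
--             tail = []
--     if tail:
--         sections = [('General', '\n'.join(tail))] + sections
--     return sections
-- ===== Notes on version B (the rewrite author's own statement) =====
-- stated objective: alternative
-- what changed: Replaces A's forward loop carrying a current label, a pending-lines buffer and an emitted-sections accumulator by a right-to-left pass that emits each section exactly when its header line is reached (no current-label state); leftover leading lines form the label-less opening section.
import Mathlib
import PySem

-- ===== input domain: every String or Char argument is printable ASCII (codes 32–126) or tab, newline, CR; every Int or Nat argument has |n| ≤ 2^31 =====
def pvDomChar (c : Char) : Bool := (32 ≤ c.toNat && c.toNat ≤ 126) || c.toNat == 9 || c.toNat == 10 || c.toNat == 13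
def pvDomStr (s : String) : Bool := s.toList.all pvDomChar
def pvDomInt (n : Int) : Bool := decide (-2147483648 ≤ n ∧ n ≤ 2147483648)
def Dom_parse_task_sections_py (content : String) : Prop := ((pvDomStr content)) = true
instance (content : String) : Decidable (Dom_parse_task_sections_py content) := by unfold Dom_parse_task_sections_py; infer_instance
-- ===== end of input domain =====

-- B replaces A's forward loop with current-label state by a right-to-left pass that emits a section at its header line; same output, same cost (objective: alternative).

-- shared data: the task_keywords table (identical literal in both Pythons)
def taskKeywords : List (String × List String) :=
  [("completed", ["completed", "done", "finished"]),
   ("in_progress", ["in progress", "working on", "underway"]),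
   ("upcoming", ["upcoming", "next", "planned", "milestones"]),
   ("blocked", ["blocked", "impediments", "challenges", "issues"])]

-- ===== PORT A =====
-- one iteration of A's 'for line in content.split('\n')' loop over the state (sections, current_section, current_content)
def pvStepA (st : List (String × String) × String × List String) (line : String) :
    List (String × String) × String × List String :=
  let (sections, currentSection, currentContent) := st
  let lineLower := PySem.Str.strip (PySem.Str.lower line)
  -- inner 'for category, keywords … break' = first entry satisfying the test
  match taskKeywords.find? (fun (p : String × List String) =>
      (p.2.any (fun kw => PySem.Str.isIn kw lineLower)) && PySem.Str.isIn ":" line) with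
  | some (category, _) =>
      let (sections, currentContent) :=
        if currentContent.isEmpty then (sections, currentContent)
        else (sections ++ [(currentSection, PySem.Str.join "\n" currentContent)], ([] : List String))
      (sections, category, currentContent ++ [line])
  | none => (sections, currentSection, currentContent ++ [line])

def parse_task_sections_py (content : String) : List (String × String) :=
  let (sections, currentSection, currentContent) :=
    ((PySem.Str.split? content "\n").getD []).foldl pvStepA ([], "General", [])
  if currentContent.isEmpty then sections
  else sections ++ [(currentSection, PySem.Str.join "\n" currentContent)]

-- ===== PORT B =====
-- _classify from Source B
def pvClassify (line : String) : Option String :=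
  if PySem.Str.isIn ":" line then
    let low := PySem.Str.strip (PySem.Str.lower line)
    (taskKeywords.find? (fun (p : String × List String) => p.2.any (fun kw => PySem.Str.isIn kw low))).map Prod.fst
  else none

-- right-to-left loop of Source B as a structural right fold; returns (sections, tail)
def pvBRec : List String → List (String × String) × List String
  | [] => ([], [])
  | l :: ls =>
      let (sections, tail) := pvBRec ls
      match pvClassify l with
      | some category => ((category, PySem.Str.join "\n" (l :: tail)) :: sections, [])
      | none => (sections, l :: tail)

def parse_task_sections_py_alt (content : String) : List (String × String) :=
  let (sections, tail) := pvBRec ((PySem.Str.split? content "\n").getD [])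
  if tail.isEmpty then sections
  else ("General", PySem.Str.join "\n" tail) :: sections

-- ===== PRECONDITION & SPEC =====
def Spec_parse_task_sections_py (content : String) (out : List (String × String)) : Prop := out = parse_task_sections_py_alt content
instance (content : String) (out : List (String × String)) : Decidable (Spec_parse_task_sections_py content out) := by unfold Spec_parse_task_sections_py; infer_instance

-- ===== CLAIM (what is proved, stated in full; the proofs are below) =====
def Claim_equal_parse_task_sections_py : Prop := ∀ (content : String), Dom_parse_task_sections_py content → Spec_parse_task_sections_py content (parse_task_sections_py content)

-- ===== LEMMAS AND PROOFS =====

-- common intermediate form: process `lines` given the pending label and buffer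
def pvG (cur : String) (acc : List String) : List String → List (String × String)
  | [] => if acc.isEmpty then [] else [(cur, PySem.Str.join "\n" acc)]
  | l :: ls =>
      match pvClassify l with
      | none => pvG cur (acc ++ [l]) ls
      | some c => (if acc.isEmpty then [] else [(cur, PySem.Str.join "\n" acc)]) ++ pvG c [l] ls

-- A's per-category test equals pvClassify
theorem pvClassify_eq (line : String) :
    (taskKeywords.find? (fun (p : String × List String) => (p.2.any (fun kw => PySem.Str.isIn kw (PySem.Str.strip (PySem.Str.lower line)))) && PySem.Str.isIn ":" line)).map Prod.fst
      = pvClassify line := by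
  unfold pvClassify
  cases hc : PySem.Str.isIn ":" line with
  | false =>
      simp only [Bool.and_false]
      simp [List.find?_eq_none]
  | true => simp

-- one A-step, phrased through pvClassify
theorem pvStepA_eq (secs : List (String × String)) (cur : String) (acc : List String) (line : String) :
    pvStepA (secs, cur, acc) line =
      match pvClassify line with
      | some c => ((if acc.isEmpty then secs else secs ++ [(cur, PySem.Str.join "\n" acc)]), c,
                   (if acc.isEmpty then acc else []) ++ [line])
      | none => (secs, cur, acc ++ [line]) := by
  unfold pvStepA
  cases hf : taskKeywords.find? (fun (p : String × List String) =>
      (p.2.any (fun kw => PySem.Str.isIn kw (PySem.Str.strip (PySem.Str.lower line)))) && PySem.Str.isIn ":" line) with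
  | none =>
      have hcl : pvClassify line = none := by rw [← pvClassify_eq line, hf]; rfl
      rw [hcl]
      simp only [hf]
  | some p =>
      obtain ⟨c, kws⟩ := p
      have hcl : pvClassify line = some c := by rw [← pvClassify_eq line, hf]; rfl
      rw [hcl]
      simp only [hf]
      cases hacc : acc.isEmpty with
      | true =>
          have : acc = [] := by cases acc <;> simp_all
          subst this
          rfl
      | false => simp only [Bool.false_eq_true, if_false]

theorem pvA_loop (lines : List String) :
    ∀ (secs : List (String × String)) (cur : String) (acc : List String),
      (let (s, c, a) := lines.foldl pvStepA (secs, cur, acc);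
        if a.isEmpty then s else s ++ [(c, PySem.Str.join "\n" a)])
      = secs ++ pvG cur acc lines := by
  induction lines with
  | nil =>
      intro secs cur acc
      simp only [List.foldl_nil, pvG]
      cases acc <;> simp
  | cons l ls ih =>
      intro secs cur acc
      simp only [List.foldl_cons, pvG, pvStepA_eq]
      cases hcl : pvClassify l with
      | none =>
          exact ih secs cur (acc ++ [l])
      | some c =>
          cases hacc : acc.isEmpty with
          | true =>
              have : acc = [] := by cases acc <;> simp_all
              subst this
              simpa using ih secs c [l]
          | false =>
              simp only [Bool.false_eq_true, if_false, List.nil_append]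
              have h := ih (secs ++ [(cur, PySem.Str.join "\n" acc)]) c [l]
              rw [← List.append_assoc]
              exact h

theorem pvB_loop (lines : List String) :
    ∀ (cur : String) (acc : List String),
      (let (out, tail) := pvBRec lines;
        if (acc ++ tail).isEmpty then out
        else (cur, PySem.Str.join "\n" (acc ++ tail)) :: out)
      = pvG cur acc lines := by
  induction lines with
  | nil =>
      intro cur acc
      simp only [pvBRec, pvG, List.append_nil]
  | cons l ls ih =>
      intro cur acc
      simp only [pvBRec, pvG]
      cases hcl : pvClassify l with
      | none =>
          have := ih cur (acc ++ [l])
          cases hb : pvBRec ls with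
          | mk out tail =>
              rw [hb] at this
              simp only [List.append_assoc, List.singleton_append] at this ⊢
              exact this
      | some c =>
          cases hb : pvBRec ls with
          | mk out tail =>
              have h1 := ih c [l]
              rw [hb] at h1
              simp only [List.singleton_append, List.isEmpty_cons, if_false, Bool.false_eq_true] at h1
              simp only [List.append_nil, ← h1]
              cases acc <;> simp

-- ===== VERDICT (by name: the statement is the Claim_ definition above) =====
theorem parse_task_sections_py_spec : Claim_equal_parse_task_sections_py := by
  intro content _
  unfold Spec_parse_task_sections_py parse_task_sections_py parse_task_sections_py_alt
  have hA := pvA_loop ((PySem.Str.split? content "\n").getD []) [] "General" []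
  have hB := pvB_loop ((PySem.Str.split? content "\n").getD []) "General" []
  simp only [List.nil_append] at hA hB
  cases hf : List.foldl pvStepA ([], "General", []) ((PySem.Str.split? content "\n").getD []) with
  | mk s1 r =>
    cases r with
    | mk c1 a1 =>
      cases hb : pvBRec ((PySem.Str.split? content "\n").getD []) with
      | mk out tail =>
        rw [hf] at hA
        rw [hb] at hB
        exact hA.trans hB.symm
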